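-- pv_equiv track=rewrite | github.com/vitessce/vitessce-python | vitessce/config.py | _get_next_scope
-- ===== SOURCE A (Python) =====
-- def _get_next_scope(prev_scopes):
--     chars = 'ABCDEFGHIJKLMNOPQRSTUVWXYZ'
--     next_char_indices = [0]
--
--     def next():
--         r = []
--         for char_index in next_char_indices:
--             r = [chars[char_index]] + r
--         increment = True
--         for i in range(len(next_char_indices)):
--             next_char_indices[i] += 1
--             val = next_char_indices[i]
--             if val >= len(chars):
--                 next_char_indices[i] = 0
--             else:
--                 increment = False
--                 break
--
--         if increment:
--             next_char_indices.append(0)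
--
--         return "".join([str(j) for j in r])
--
--     next_scope = next()
--     while next_scope in prev_scopes:
--         next_scope = next()
--
--     return next_scope
-- ===== SOURCE B (Python) =====
-- def _get_next_scope(prev_scopes):
--     used = set(prev_scopes)
--     n = 1
--     while True:
--         s = ""
--         m = n
--         while m > 0:
--             m -= 1
--             s = chr(ord('A') + m % 26) + s
--             m //= 26
--         if s not in used:
--             return s
--         n += 1
-- ===== Notes on version B (the rewrite author's own statement) =====
-- stated objective: simpler
-- what changed: Replaces A's mutable digit-list odometer closure with an integer counter converted to a bijective base-26 (Excel-column) string, and a set for membership instead of repeated list scans.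
import Mathlib
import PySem

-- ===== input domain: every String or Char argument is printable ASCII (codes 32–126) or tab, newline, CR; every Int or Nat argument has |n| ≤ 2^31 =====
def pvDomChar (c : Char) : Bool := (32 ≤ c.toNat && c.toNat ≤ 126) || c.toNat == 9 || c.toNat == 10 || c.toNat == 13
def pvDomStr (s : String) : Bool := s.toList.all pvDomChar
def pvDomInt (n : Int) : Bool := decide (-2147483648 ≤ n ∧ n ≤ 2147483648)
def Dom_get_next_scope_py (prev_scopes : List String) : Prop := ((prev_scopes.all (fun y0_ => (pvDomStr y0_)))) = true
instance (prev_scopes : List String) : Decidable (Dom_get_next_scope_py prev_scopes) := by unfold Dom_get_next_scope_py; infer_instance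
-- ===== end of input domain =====

-- B replaces A's mutable digit-list odometer by an integer counter rendered as a
-- bijective base-26 ("Excel column") string — simpler, and with a set for membership.

-- ===== PORT A =====
-- A's alphabet, as the list of characters it indexes into.
def pvChars : List Char := "ABCDEFGHIJKLMNOPQRSTUVWXYZ".toList

-- the body of next(): render the current digit list (prepend each indexed char).
def pvRender (st : List Nat) : String :=
  String.ofList (st.foldl (fun r ci => pvChars.getD ci 'A' :: r) [])

-- the increment half of next(): bump digits with carry; append a digit if all wrapped.
def pvIncr : List Nat → List Nat
  | [] => [0]
  | d :: ds => if d + 1 ≥ 26 then 0 :: pvIncr ds else (d + 1) :: ds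

-- the while loop of A; fuel = prev.length + 1 only makes the recursion total
-- (by pigeonhole the loop always stops before the fuel runs out).
def pvALoop (prev : List String) : Nat → List Nat → String
  | 0, st => pvRender st
  | f + 1, st =>
      let s := pvRender st
      if s ∈ prev then pvALoop prev f (pvIncr st) else s

def get_next_scope_py (prev_scopes : List String) : String :=
  pvALoop prev_scopes (prev_scopes.length + 1) [0]

-- ===== PORT B =====
-- inner while loop of B: peel bijective base-26 digits of m, prepending characters.
def pvScopeGo : Nat → List Char → List Char
  | 0, s => s
  | m + 1, s => pvScopeGo (m / 26) (Char.ofNat (65 + m % 26) :: s)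
decreasing_by exact Nat.lt_succ_of_le (Nat.div_le_self m 26)

def pvScope (n : Nat) : String := String.ofList (pvScopeGo n [])

-- outer while loop of B; same fuel guard for totality.
def pvBLoop (used : PySem.Set String) : Nat → Nat → String
  | 0, n => pvScope n
  | f + 1, n =>
      let s := pvScope n
      if PySem.Set.contains used s then pvBLoop used f (n + 1) else s

def get_next_scope_py_alt (prev_scopes : List String) : String :=
  let used := PySem.Set.ofList prev_scopes
  pvBLoop used (prev_scopes.length + 1) 1

-- ===== PRECONDITION & SPEC =====
def Spec_get_next_scope_py (prev_scopes : List String) (out : String) : Prop := out = get_next_scope_py_alt prev_scopes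
instance (prev_scopes : List String) (out : String) : Decidable (Spec_get_next_scope_py prev_scopes out) := by unfold Spec_get_next_scope_py; infer_instance

-- ===== CLAIM (what is proved, stated in full; the proofs are below) =====
def Claim_equal_get_next_scope_py : Prop := ∀ (prev_scopes : List String), Dom_get_next_scope_py prev_scopes → Spec_get_next_scope_py prev_scopes (get_next_scope_py prev_scopes)

-- ===== LEMMAS AND PROOFS =====

-- the little-endian bijective base-26 digit list of n (n = Σ (dᵢ+1)·26ⁱ).
def pvBij : Nat → List Nat
  | 0 => []
  | m + 1 => (m % 26) :: pvBij (m / 26)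
decreasing_by exact Nat.lt_succ_of_le (Nat.div_le_self m 26)

-- A's odometer increment is the numeric successor on bijective digit lists.
theorem pvIncr_bij (m : Nat) : pvIncr (pvBij m) = pvBij (m + 1) := by
  induction m using Nat.strong_induction_on with
  | _ m ih =>
    match m with
    | 0 => simp [pvBij, pvIncr]
    | m + 1 =>
      rw [pvBij, pvIncr]
      by_cases h : m % 26 + 1 ≥ 26
      · have h25 : m % 26 = 25 := by omega
        have hd : (m + 1) % 26 = 0 := by omega
        have hq : (m + 1) / 26 = m / 26 + 1 := by omega
        rw [if_pos h, ih (m / 26) (Nat.lt_succ_of_le (Nat.div_le_self m 26))]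
        show _ = pvBij (m + 1 + 1)
        conv_rhs => rw [pvBij, hd, hq]
      · have hd : (m + 1) % 26 = m % 26 + 1 := by omega
        have hq : (m + 1) / 26 = m / 26 := by omega
        rw [if_neg h]
        show _ = pvBij (m + 1 + 1)
        conv_rhs => rw [pvBij, hd, hq]

-- chars[i] for i < 26 is the character 'A' + i.
theorem pvChars_getD (i : Nat) (h : i < 26) :
    pvChars.getD i 'A' = Char.ofNat (65 + i) := by
  have hall : ∀ j < 26, pvChars.getD j 'A' = Char.ofNat (65 + j) := by decide
  exact hall i h

-- rendering a bijective digit list from an accumulator = B's character loop.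
theorem pvScopeGo_eq (m : Nat) (acc : List Char) :
    pvScopeGo m acc = (pvBij m).foldl (fun r ci => pvChars.getD ci 'A' :: r) acc := by
  induction m using Nat.strong_induction_on generalizing acc with
  | _ m ih =>
    match m with
    | 0 => simp [pvScopeGo, pvBij]
    | m + 1 =>
      rw [pvScopeGo, pvBij, List.foldl_cons,
        ih (m / 26) (Nat.lt_succ_of_le (Nat.div_le_self m 26)),
        pvChars_getD (m % 26) (Nat.mod_lt m (by norm_num))]

theorem pvRender_bij (m : Nat) : pvRender (pvBij m) = pvScope m := by
  rw [pvRender, pvScope, pvScopeGo_eq]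

-- the two loops agree when A's state is the digit list of B's counter.
theorem pvLoop_eq (prev : List String) (f n : Nat) :
    pvALoop prev f (pvBij n) = pvBLoop (PySem.Set.ofList prev) f n := by
  induction f generalizing n with
  | zero => rw [pvALoop, pvBLoop, pvRender_bij]
  | succ f ih =>
    rw [pvALoop, pvBLoop, pvRender_bij]
    simp only [PySem.Set.contains_iff, PySem.Set.mem_ofList]
    by_cases h : pvScope n ∈ prev
    · rw [if_pos h, if_pos (by simpa using h), pvIncr_bij, ih]
    · rw [if_neg h, if_neg (by simpa using h)]

-- ===== VERDICT (by name: the statement is the Claim_ definition above) =====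
theorem get_next_scope_py_spec : Claim_equal_get_next_scope_py := by
  intro prev _
  show get_next_scope_py prev = get_next_scope_py_alt prev
  rw [get_next_scope_py, get_next_scope_py_alt]
  have h1 : pvBij 1 = [0] := by rw [pvBij]; norm_num; rw [pvBij]
  rw [← h1, pvLoop_eq]
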